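-- pv_equiv track=rewrite | github.com/hyzhak/todo-bot | todo/sense.py | split_by_linked_words
-- ===== SOURCE A (Python) =====
-- LINKED_WORDS = [',', '.', 'and', 'or', '...', '/', '\n']
--
-- def split_by_linked_words(tokens):
--     sentence = []
--     for t in tokens:
--         if t in LINKED_WORDS:
--             yield sentence
--             sentence = []
--         else:
--             sentence.append(t)
--     yield sentence
-- ===== SOURCE B (Python) =====
-- LINKED_WORDS = [',', '.', 'and', 'or', '...', '/', '\n']
--
-- def split_by_linked_words(tokens):
--     toks = list(tokens)
--     breaks = [i for i, t in enumerate(toks) if t in LINKED_WORDS]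
--     prev = 0
--     for b in breaks:
--         yield toks[prev:b]
--         prev = b + 1
--     yield toks[prev:]
-- ===== Notes on version B (the rewrite author's own statement) =====
-- stated objective: alternative
-- what changed: Two-phase decomposition: first a comprehension collects all break indices (positions of linking words), then a second loop yields segments by slicing between consecutive breaks, instead of A's single streaming pass with a growing accumulator list.
import Mathlib
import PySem

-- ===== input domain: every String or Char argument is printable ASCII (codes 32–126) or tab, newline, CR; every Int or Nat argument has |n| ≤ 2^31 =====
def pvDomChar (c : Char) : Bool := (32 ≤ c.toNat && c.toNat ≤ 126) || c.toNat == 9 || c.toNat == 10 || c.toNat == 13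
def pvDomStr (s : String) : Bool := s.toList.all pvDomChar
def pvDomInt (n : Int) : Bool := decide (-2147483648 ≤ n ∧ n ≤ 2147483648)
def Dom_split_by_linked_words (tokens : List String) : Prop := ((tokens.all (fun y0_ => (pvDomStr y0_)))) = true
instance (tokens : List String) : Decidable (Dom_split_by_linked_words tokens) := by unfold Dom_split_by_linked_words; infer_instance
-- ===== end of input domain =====

-- B replaces A's single streaming accumulator pass by two phases (collect break indices, then slice
-- between them); same O(n) cost, objective: alternative decomposition. Equivalence is about the
-- materialized output list (the Python functions are generators).

def LINKED_WORDS : List String := [",", ".", "and", "or", "...", "/", "\n"]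

-- ===== PORT A =====
-- loop 'for t in tokens' with accumulator 'sentence'; final 'yield sentence'
def splitA_go : List String → List String → List (List String)
  | [], sentence => [sentence]
  | t :: ts, sentence =>
    if t ∈ LINKED_WORDS then sentence :: splitA_go ts []
    else splitA_go ts (sentence ++ [t])

def split_by_linked_words (tokens : List String) : List (List String) :=
  splitA_go tokens []

-- ===== PORT B =====
-- breaks = [i for i, t in enumerate(toks) if t in LINKED_WORDS]  (start parameter generalizes 0 for the proof)
def splitB_breaksFrom (ts : List String) (s : Int) : List Int :=
  ((PySem.List.enumerate ts s).filter (fun p => decide (p.2 ∈ LINKED_WORDS))).map Prod.fst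

-- for b in breaks: yield toks[prev:b]; prev = b + 1 ... yield toks[prev:]
def splitB_go (toks : List String) : List Int → Int → List (List String)
  | [], prev => [PySem.List.slice toks (some prev) none]
  | b :: bs, prev => PySem.List.slice toks (some prev) (some b) :: splitB_go toks bs (b + 1)

def split_by_linked_words_alt (tokens : List String) : List (List String) :=
  splitB_go tokens (splitB_breaksFrom tokens 0) 0

-- ===== PRECONDITION & SPEC =====
def Spec_split_by_linked_words (tokens : List String) (out : List (List String)) : Prop := out = split_by_linked_words_alt tokens
instance (tokens : List String) (out : List (List String)) : Decidable (Spec_split_by_linked_words tokens out) := by unfold Spec_split_by_linked_words; infer_instance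

-- ===== CLAIM (what is proved, stated in full; the proofs are below) =====
def Claim_equal_split_by_linked_words : Prop := ∀ (tokens : List String), Dom_split_by_linked_words tokens → Spec_split_by_linked_words tokens (split_by_linked_words tokens)

-- ===== LEMMAS AND PROOFS =====

-- Invariant: remaining input is toks.drop n, the open segment is toks[prev:n].
theorem split_key (ts : List String) : ∀ (toks : List String) (n prev : Nat) (sentence : List String),
    toks.drop n = ts → prev ≤ n → (toks.drop prev).take (n - prev) = sentence →
    splitA_go ts sentence =
      splitB_go toks (((PySem.List.enumerate ts (n : Int)).filter
        (fun p => decide (p.2 ∈ LINKED_WORDS))).map Prod.fst) (prev : Int) := by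
  induction ts with
  | nil =>
    intro toks n prev sentence hdrop hle hsent
    have hlen : toks.length ≤ n := by
      have := congrArg List.length hdrop
      simp [List.length_drop] at this
      omega
    rw [splitA_go]
    rw [PySem.List.enumerate_nil]
    simp only [List.filter_nil, List.map_nil]
    rw [splitB_go, PySem.List.slice_from_natCast]
    have htake : (toks.drop prev).take (n - prev) = toks.drop prev :=
      List.take_of_length_le (by rw [List.length_drop]; omega)
    rw [← hsent, htake]
  | cons t ts ih =>
    intro toks n prev sentence hdrop hle hsent
    have hget : toks[n]? = some t := by
      have h := congrArg (fun l => l[0]?) hdrop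
      simpa [List.getElem?_drop] using h
    have hdrop2 : toks.drop (n + 1) = ts := by
      have h := congrArg (List.drop 1) hdrop
      simpa [List.drop_drop, Nat.add_comm] using h
    rw [PySem.List.enumerate_cons]
    by_cases hmem : t ∈ LINKED_WORDS
    · simp only [List.filter_cons, hmem, decide_true, if_pos, List.map_cons]
      rw [splitB_go, splitA_go, if_pos hmem]
      have h1 : PySem.List.slice toks (some (prev : Int)) (some (n : Int)) = sentence := by
        rw [PySem.List.slice_natCast, hsent]
      rw [h1]
      have h2 := ih toks (n + 1) (n + 1) [] hdrop2 (le_refl _) (by simp)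
      push_cast at h2
      rw [h2]
    · simp only [List.filter_cons, hmem, decide_false]
      rw [splitA_go, if_neg hmem]
      have hsent2 : (toks.drop prev).take (n + 1 - prev) = sentence ++ [t] := by
        have hnp : n + 1 - prev = (n - prev) + 1 := by omega
        rw [hnp, List.take_add_one, hsent]
        have hx : (toks.drop prev)[n - prev]? = some t := by
          rw [List.getElem?_drop]
          have hy : prev + (n - prev) = n := by omega
          rw [hy, hget]
        simp [hx]
      have h2 := ih toks (n + 1) prev (sentence ++ [t]) hdrop2 (by omega) hsent2
      push_cast at h2
      simpa using h2

-- ===== VERDICT (by name: the statement is the Claim_ definition above) =====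
theorem split_by_linked_words_spec : Claim_equal_split_by_linked_words := by
  intro tokens _
  show split_by_linked_words tokens = split_by_linked_words_alt tokens
  rw [split_by_linked_words, split_by_linked_words_alt, splitB_breaksFrom]
  have h := split_key tokens tokens 0 0 [] (by simp) (le_refl _) (by simp)
  simpa using h
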